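-- pv_equiv track=rewrite | github.com/PaddlePaddle/Paddle | python/paddle/distributed/auto_parallel/dynamic_dims_inference.py | compute_compatible_dynamic_dims
-- ===== SOURCE A (Python) =====
-- def compute_compatible_dynamic_dim(dynamic_dims):
--     if not dynamic_dims:
--         return None
--     compatible_dim = 0
--     for dim in dynamic_dims:
--         if dim == 1:
--             compatible_dim = 1
--     return compatible_dim
--
-- def compute_compatible_dynamic_dims(dynamic_dims_list):
--     if not dynamic_dims_list:
--         return None
--     length = len(dynamic_dims_list[0])
--     for dynamic_dims in dynamic_dims_list:
--         assert dynamic_dims is not None, \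
--             "Dims dim must not be None for compatible computation"
--         assert len(dynamic_dims) == length, \
--             "The length of dynamic_dims in list must be same for compatible computation."
--     compatible_result = []
--     for dynamic_dims in zip(*dynamic_dims_list):
--         compatible_dynamic_dim = compute_compatible_dynamic_dim(
--             list(dynamic_dims))
--         compatible_result.append(compatible_dynamic_dim)
--     if not compatible_result:
--         return None
--     return compatible_result
-- ===== SOURCE B (Python) =====
-- def compute_compatible_dynamic_dims(dynamic_dims_list):
--     if not dynamic_dims_list:
--         return None
--     length = len(dynamic_dims_list[0])
--     for dynamic_dims in dynamic_dims_list: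
--         assert dynamic_dims is not None, \
--             "Dims dim must not be None for compatible computation"
--         assert len(dynamic_dims) == length, \
--             "The length of dynamic_dims in list must be same for compatible computation."
--     result = [0] * length
--     for dynamic_dims in dynamic_dims_list:
--         for i, dim in enumerate(dynamic_dims):
--             if dim == 1:
--                 result[i] = 1
--     if not result:
--         return None
--     return result
-- ===== Notes on version B (the rewrite author's own statement) =====
-- stated objective: simpler
-- what changed: Replaced the zip(*...)-transpose plus per-column helper with a single row-major accumulation into a preallocated [0]*length result, setting result[i]=1 whenever a row has 1 at i.
import Mathlib
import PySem

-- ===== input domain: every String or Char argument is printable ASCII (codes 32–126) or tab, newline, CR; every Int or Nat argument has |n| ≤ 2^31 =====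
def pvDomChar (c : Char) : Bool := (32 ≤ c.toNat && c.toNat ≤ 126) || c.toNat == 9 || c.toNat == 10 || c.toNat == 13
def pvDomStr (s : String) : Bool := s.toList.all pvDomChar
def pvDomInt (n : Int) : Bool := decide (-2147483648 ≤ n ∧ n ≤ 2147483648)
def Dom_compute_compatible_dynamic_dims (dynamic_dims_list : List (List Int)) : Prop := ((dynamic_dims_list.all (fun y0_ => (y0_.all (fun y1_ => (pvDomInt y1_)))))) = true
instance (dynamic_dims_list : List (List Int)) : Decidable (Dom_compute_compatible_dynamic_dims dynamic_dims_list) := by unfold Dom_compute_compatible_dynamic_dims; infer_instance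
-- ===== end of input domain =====

-- B replaces A's zip(*...)-transpose + per-column helper by one row-major accumulation
-- into a preallocated [0]*length result (objective: simpler; same asymptotic cost).

-- ===== PORT A =====

-- compute_compatible_dynamic_dim: None on empty, else fold keeping 1 once a dim == 1
def pv_ccd (dynamic_dims : List Int) : Option Int :=
  if dynamic_dims = [] then none
  else some (dynamic_dims.foldl (fun compatible_dim dim => if dim == 1 then 1 else compatible_dim) 0)

-- zip(*dynamic_dims_list): columns up to the minimum row length (row indices < every row's length)
def pvZipStar (l : List (List Int)) : List (List Int) :=
  match l.map List.length with
  | [] => []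
  | x :: xs => (List.range (xs.foldl min x)).map (fun i => l.map (fun r => r.getD i 0))

def compute_compatible_dynamic_dims (dynamic_dims_list : List (List Int)) : Option (List (Option Int)) :=
  if dynamic_dims_list = [] then none
  else
    -- the two asserts hold on every input admitted by Pre_; Python raises outside it
    let compatible_result := (pvZipStar dynamic_dims_list).map (fun c => pv_ccd c)
    if compatible_result = [] then none else some compatible_result

-- ===== PORT B =====

-- "for i, dim in enumerate(dynamic_dims): if dim == 1: result[i] = 1"
def pvSetOnes : List Int → Nat → List (Option Int) → List (Option Int)
  | [], _, res => res
  | dim :: ds, i, res => pvSetOnes ds (i + 1) (if dim == 1 then res.set i (some 1) else res)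

def compute_compatible_dynamic_dims_alt (dynamic_dims_list : List (List Int)) : Option (List (Option Int)) :=
  if dynamic_dims_list = [] then none
  else
    let length := (dynamic_dims_list.headD []).length
    let result := dynamic_dims_list.foldl (fun res row => pvSetOnes row 0 res)
      (List.replicate length (some 0))
    if result = [] then none else some result

-- ===== PRECONDITION & SPEC =====
-- Pre_ excludes exactly the inputs on which A's second assert fails (rows of unequal length):
-- Python A raises AssertionError there and returns no value.
def Pre_compute_compatible_dynamic_dims (dynamic_dims_list : List (List Int)) : Prop :=
  ∀ r ∈ dynamic_dims_list, r.length = (dynamic_dims_list.headD []).length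
instance (dynamic_dims_list : List (List Int)) : Decidable (Pre_compute_compatible_dynamic_dims dynamic_dims_list) := by unfold Pre_compute_compatible_dynamic_dims; infer_instance

def pvWitness_compute_compatible_dynamic_dims : List (List Int) := [[1, 2], [3, 1]]

def Spec_compute_compatible_dynamic_dims (dynamic_dims_list : List (List Int)) (out : Option (List (Option Int))) : Prop := out = compute_compatible_dynamic_dims_alt dynamic_dims_list
instance (dynamic_dims_list : List (List Int)) (out : Option (List (Option Int))) : Decidable (Spec_compute_compatible_dynamic_dims dynamic_dims_list out) := by unfold Spec_compute_compatible_dynamic_dims; infer_instance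

-- ===== CLAIM (what is proved, stated in full; the proofs are below) =====
def Claim_equal_compute_compatible_dynamic_dims : Prop := ∀ (dynamic_dims_list : List (List Int)), Dom_compute_compatible_dynamic_dims dynamic_dims_list → Pre_compute_compatible_dynamic_dims dynamic_dims_list → Spec_compute_compatible_dynamic_dims dynamic_dims_list (compute_compatible_dynamic_dims dynamic_dims_list)

-- ===== LEMMAS AND PROOFS =====

-- foldl min over a constant list
theorem pv_foldl_min_const (xs : List Nat) (a : Nat) (h : ∀ x ∈ xs, x = a) :
    xs.foldl min a = a := by
  induction xs with
  | nil => rfl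
  | cons x xs ih =>
    have hx : x = a := h x (by simp)
    simp [List.foldl, hx, min_self]
    exact ih (fun y hy => h y (by simp [hy]))

-- A's helper fold: 1 iff some element equals 1
theorem pv_ccd_fold (xs : List Int) (a : Int) :
    xs.foldl (fun compatible_dim dim => if dim == 1 then 1 else compatible_dim) a
      = if xs.any (· == 1) then 1 else a := by
  induction xs generalizing a with
  | nil => simp
  | cons x xs ih =>
    simp only [List.foldl, List.any_cons, ih]
    by_cases hx : x = 1 <;> by_cases hxs : xs.any (· == 1) = true <;>
      simp [hx, hxs]

theorem pvSetOnes_length (ds : List Int) (i : Nat) (res : List (Option Int)) :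
    (pvSetOnes ds i res).length = res.length := by
  induction ds generalizing i res with
  | nil => rfl
  | cons d ds ih =>
    simp only [pvSetOnes, ih]
    split <;> simp

theorem pvSetOnes_getD (ds : List Int) (i : Nat) (res : List (Option Int)) (j : Nat)
    (hj : j < res.length) :
    (pvSetOnes ds i res).getD j none =
      if i ≤ j ∧ j < i + ds.length ∧ ds.getD (j - i) 0 = 1 then some 1
      else res.getD j none := by
  induction ds generalizing i res with
  | nil =>
    simp only [pvSetOnes, List.length_nil]
    split
    · omega
    · rfl
  | cons d ds ih =>
    simp only [pvSetOnes]
    have hlen : (if (d == 1) = true then res.set i (some 1) else res).length = res.length := by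
      split <;> simp
    rw [ih (i + 1) _ (by rw [hlen]; exact hj)]
    have hset : ∀ v : Option Int, (res.set i v).getD j none =
        if i = j then v else res.getD j none := by
      intro v
      simp only [List.getD]
      rw [List.getElem?_set_of_lt _ _ hj]
      split <;> rfl
    have hinner : (if (d == 1) = true then res.set i (some 1) else res).getD j none =
        if d = 1 ∧ i = j then some 1 else res.getD j none := by
      by_cases hd : d = 1
      · rw [if_pos (by simp [hd]), hset]
        by_cases hij : i = j <;> simp [hd, hij]
      · rw [if_neg (by simp [hd])]
        simp [hd]
    rw [hinner]
    have hlc : (d :: ds).length = ds.length + 1 := by simp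
    have hgd1 : i + 1 ≤ j → (d :: ds).getD (j - i) 0 = ds.getD (j - (i + 1)) 0 := by
      intro h
      have h' : j - i = (j - (i + 1)) + 1 := by omega
      simp [h', List.getD]
    have hgd0 : i = j → (d :: ds).getD (j - i) 0 = d := by
      intro h
      simp [← h, List.getD]
    by_cases h1 : i + 1 ≤ j ∧ j < i + 1 + ds.length ∧ ds.getD (j - (i + 1)) 0 = 1
    · rw [if_pos h1, if_pos ⟨by omega, by rw [hlc]; omega,
        by rw [hgd1 h1.1]; exact h1.2.2⟩]
    · rw [if_neg h1]
      by_cases h2 : d = 1 ∧ i = j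
      · rw [if_pos h2, if_pos ⟨by omega, by rw [hlc]; omega,
          by rw [hgd0 h2.2]; exact h2.1⟩]
      · rw [if_neg h2, if_neg ?_]
        intro hc
        by_cases hij : i = j
        · exact h2 ⟨by rw [← hgd0 hij]; exact hc.2.2, hij⟩
        · have hb := hc.2.1
          rw [hlc] at hb
          exact h1 ⟨by omega, by omega, by rw [← hgd1 (by omega)]; exact hc.2.2⟩

theorem pv_rowfold_length (l : List (List Int)) (res : List (Option Int)) :
    (l.foldl (fun res row => pvSetOnes row 0 res) res).length = res.length := by
  induction l generalizing res with
  | nil => rfl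
  | cons r l ih => simp [List.foldl, ih, pvSetOnes_length]

theorem pv_rowfold_getD (l : List (List Int)) (res : List (Option Int)) (j : Nat)
    (hj : j < res.length) (hl : ∀ r ∈ l, r.length = res.length) :
    (l.foldl (fun res row => pvSetOnes row 0 res) res).getD j none =
      if l.any (fun r => r.getD j 0 == 1) then some 1 else res.getD j none := by
  induction l generalizing res with
  | nil => simp
  | cons r l ih =>
    have hr : r.length = res.length := hl r (by simp)
    have hlen := pvSetOnes_length r 0 res
    rw [List.foldl_cons, ih (pvSetOnes r 0 res) (by rw [hlen]; exact hj)
      (fun r' hr' => by rw [hlen]; exact hl r' (by simp [hr']))]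
    rw [pvSetOnes_getD r 0 res j hj]
    have hcond : (0 ≤ j ∧ j < 0 + r.length ∧ r.getD (j - 0) 0 = 1) ↔ r.getD j 0 = 1 := by
      constructor
      · intro h; simpa using h.2.2
      · intro h; exact ⟨by omega, by omega, by simpa using h⟩
    rw [List.any_cons]
    by_cases h1 : (r.getD j 0 == 1) = true <;>
      by_cases h2 : (l.any fun r => r.getD j 0 == 1) = true
    · rw [if_pos h2, if_pos (by rw [h1, Bool.true_or])]
    · rw [if_neg h2, if_pos (hcond.mpr (by simpa using h1)),
        if_pos (by rw [h1, Bool.true_or])]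
    · rw [if_pos h2, if_pos (by rw [h2, Bool.or_true])]
    · rw [if_neg h2, if_neg (fun hc => h1 (by simpa using hcond.mp hc)),
        if_neg (by intro hc; rw [Bool.or_eq_true] at hc; tauto)]

-- ===== VERDICT (by name: the statement is the Claim_ definition above) =====
theorem compute_compatible_dynamic_dims_spec : Claim_equal_compute_compatible_dynamic_dims := by
  intro l _ hpre
  unfold Spec_compute_compatible_dynamic_dims
  unfold compute_compatible_dynamic_dims compute_compatible_dynamic_dims_alt
  by_cases hnil : l = []
  · simp [hnil]
  · rw [if_neg hnil, if_neg hnil]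
    obtain ⟨r0, rest, rfl⟩ := List.exists_cons_of_ne_nil hnil
    set n := r0.length with hn
    have hhead : ((r0 :: rest).headD []).length = n := by simp [hn]
    have hall : ∀ r ∈ r0 :: rest, r.length = n := by
      intro r hr; rw [hpre r hr, hhead]
    -- A's columns
    have hmin : (rest.map List.length).foldl min r0.length = n := by
      apply pv_foldl_min_const
      intro x hx
      simp only [List.mem_map] at hx
      obtain ⟨r, hr, rfl⟩ := hx
      exact hall r (by simp [hr])
    have hzip : pvZipStar (r0 :: rest) =
        (List.range n).map (fun i => (r0 :: rest).map (fun r => r.getD i 0)) := by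
      simp [pvZipStar, hmin]
    by_cases hn0 : n = 0
    · -- both results empty → both return none
      have hAnil : (pvZipStar (r0 :: rest)).map (fun c => pv_ccd c) = [] := by
        rw [hzip, hn0]; simp
      have hBnil : (r0 :: rest).foldl (fun res row => pvSetOnes row 0 res)
          (List.replicate (((r0 :: rest).headD []).length) (some (0 : Int))) = [] := by
        apply List.length_eq_zero_iff.mp
        rw [pv_rowfold_length]
        simp only [List.length_replicate, hhead, hn0]
      show (if (pvZipStar (r0 :: rest)).map (fun c => pv_ccd c) = [] then none
            else some ((pvZipStar (r0 :: rest)).map (fun c => pv_ccd c))) =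
          (if (r0 :: rest).foldl (fun res row => pvSetOnes row 0 res)
              (List.replicate (((r0 :: rest).headD []).length) (some (0 : Int))) = [] then none
            else some ((r0 :: rest).foldl (fun res row => pvSetOnes row 0 res)
              (List.replicate (((r0 :: rest).headD []).length) (some (0 : Int)))))
      rw [if_pos hAnil, if_pos hBnil]
    · -- both nonempty: compare the two length-n lists pointwise
      set L := r0 :: rest
      set R := L.foldl (fun res row => pvSetOnes row 0 res) (List.replicate n (some (0 : Int)))
        with hR
      have hRlen : R.length = n := by
        rw [hR, pv_rowfold_length]; simp
      have hAlist : (pvZipStar L).map (fun c => pv_ccd c) =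
          (List.range n).map (fun i =>
            if L.any (fun r => r.getD i 0 == 1) then some 1 else some 0) := by
        rw [hzip, List.map_map]
        apply List.map_congr_left
        intro i _
        have hne : L.map (fun r => r.getD i 0) ≠ [] := by simp [L]
        simp only [Function.comp, pv_ccd, if_neg hne, pv_ccd_fold, List.any_map]
        split <;> rename_i h
        · rw [if_pos (by simpa [Function.comp] using h)]
        · rw [if_neg (by simpa [Function.comp] using h)]
      have hBlist : R = (List.range n).map (fun i =>
          if L.any (fun r => r.getD i 0 == 1) then some 1 else some 0) := by
        apply List.ext_getElem
        · simp [hRlen]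
        · intro j hj hj'
          have hjn : j < n := by rwa [hRlen] at hj
          have hrep : j < (List.replicate n (some (0 : Int))).length := by simp [hjn]
          have := pv_rowfold_getD L (List.replicate n (some 0)) j hrep
            (fun r hr => by simp [hall r hr])
          have h1 : R[j] = R.getD j none :=
            (List.getD_eq_getElem R none hj).symm
          have h2 : R.getD j none =
              if (L.any fun r => r.getD j 0 == 1) = true then some 1
              else (List.replicate n (some (0 : Int))).getD j none := this
          rw [h1, h2]
          simp [hjn, List.getD]
      rw [hAlist, hhead, ← hBlist]
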